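-- pv_equiv track=rewrite | github.com/pragnakalpdev85/Python-Practice-questions | combined_topic/practice.py | character_to_lowercase
-- ===== SOURCE A (Python) =====
-- def character_to_lowercase(character: str) -> str:
--     upper = "ABCDEFGHIJKLMNOPQRSTUVWXYZ"
--     lower = "abcdefghijklmnopqrstuvwxyz"
--
--     index = 0
--     for ch in upper:
--         if ch == character:
--             return lower[index]
--         index += 1
--
--     return character
-- ===== SOURCE B (Python) =====
-- def character_to_lowercase(character: str) -> str:
--     if len(character) == 1 and 'A' <= character <= 'Z':
--         return chr(ord(character) + 32)
--     return character
-- ===== Notes on version B (the rewrite author's own statement) =====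
-- stated objective: simpler
-- what changed: Replaced the 26-step scan over a parallel upper/lower alphabet table with a single length-and-range guard plus ASCII offset arithmetic chr(ord(c)+32).
import Mathlib
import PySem

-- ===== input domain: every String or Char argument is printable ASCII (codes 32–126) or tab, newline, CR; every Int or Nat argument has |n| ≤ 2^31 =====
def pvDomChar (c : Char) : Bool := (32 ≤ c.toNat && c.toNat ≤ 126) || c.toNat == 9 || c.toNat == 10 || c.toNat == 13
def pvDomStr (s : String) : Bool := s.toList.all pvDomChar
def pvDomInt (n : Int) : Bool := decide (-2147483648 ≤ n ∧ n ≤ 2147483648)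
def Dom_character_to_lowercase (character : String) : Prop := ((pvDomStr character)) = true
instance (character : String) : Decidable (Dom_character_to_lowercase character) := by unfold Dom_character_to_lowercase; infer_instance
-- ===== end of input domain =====

-- B replaces A's scan of the alphabet with one ASCII-offset computation (objective: simpler/idiomatic).

-- ===== PORT A =====
-- A's for-loop over the 26 uppercase letters, carrying the index; Python's 1-char
-- loop variable `ch` compared with the string `character` is `String.ofList [c] == character`;
-- `lower[index]` (a 1-char Python string) is PySem.Str.pyGet? wrapped back into a String.
def charToLowerLoop (character : String) (l : List Char) (index : Int) : Option String :=
  match l with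
  | [] => none
  | c :: rest =>
      if String.ofList [c] == character then
        (PySem.Str.pyGet? "abcdefghijklmnopqrstuvwxyz" index).map (fun ch => String.ofList [ch])
      else charToLowerLoop character rest (index + 1)

def character_to_lowercase (character : String) : String :=
  match charToLowerLoop character "ABCDEFGHIJKLMNOPQRSTUVWXYZ".toList 0 with
  | some s => s
  | none => character

-- ===== PORT B =====
-- B's `len(character) == 1` guard is the match on toList; on a 1-char string the
-- Python comparison 'A' <= character <= 'Z' is the comparison of its single char;
-- chr(ord(character) + 32) is Char.ofNat (c.toNat + 32).
def character_to_lowercase_alt (character : String) : String :=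
  match character.toList with
  | [c] => if 'A' ≤ c ∧ c ≤ 'Z' then String.ofList [Char.ofNat (c.toNat + 32)] else character
  | _ => character

-- ===== PRECONDITION & SPEC =====
def Spec_character_to_lowercase (character : String) (out : String) : Prop := out = character_to_lowercase_alt character
instance (character : String) (out : String) : Decidable (Spec_character_to_lowercase character out) := by unfold Spec_character_to_lowercase; infer_instance

-- ===== CLAIM (what is proved, stated in full; the proofs are below) =====
def Claim_equal_character_to_lowercase : Prop := ∀ (character : String), Dom_character_to_lowercase character → Spec_character_to_lowercase character (character_to_lowercase character)

-- ===== LEMMAS AND PROOFS =====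

-- If no element of l, read as a 1-char string, equals `character`, the loop misses.
theorem charToLowerLoop_none (character : String) (l : List Char) (index : Int)
    (h : ∀ c ∈ l, String.ofList [c] ≠ character) :
    charToLowerLoop character l index = none := by
  induction l generalizing index with
  | nil => rfl
  | cons c rest ih =>
      simp only [charToLowerLoop]
      rw [if_neg (by simpa using h c (List.mem_cons_self ..))]
      exact ih _ (fun c' hc' => h c' (List.mem_cons_of_mem _ hc'))

theorem singleton_eq_iff (c : Char) (s : String) : String.ofList [c] = s ↔ s.toList = [c] := by
  constructor
  · intro h; rw [← h, String.toList_ofList]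
  · intro h; rw [← h, String.ofList_toList]

def upperList : List Char :=
  ['A','B','C','D','E','F','G','H','I','J','K','L','M','N','O','P','Q','R','S','T','U','V','W','X','Y','Z']

theorem upper_toList : "ABCDEFGHIJKLMNOPQRSTUVWXYZ".toList = upperList := by decide

-- A character of the uppercase alphabet list is between 'A' and 'Z'.
theorem upper_mem_range (c : Char) (h : c ∈ upperList) : 'A' ≤ c ∧ c ≤ 'Z' := by
  fin_cases h <;> exact ⟨by decide, by decide⟩

theorem character_to_lowercase_spec : Claim_equal_character_to_lowercase := by
  intro character _
  unfold Spec_character_to_lowercase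
  unfold character_to_lowercase character_to_lowercase_alt
  rcases hl : character.toList with _ | ⟨c, _ | ⟨c', rest⟩⟩
  · -- empty string: loop never matches
    show _ = character
    rw [charToLowerLoop_none]
    intro d _ hd
    rw [singleton_eq_iff, hl] at hd
    simp at hd
  · -- single character
    show _ = if 'A' ≤ c ∧ c ≤ 'Z' then String.ofList [Char.ofNat (c.toNat + 32)] else character
    have hchar : character = String.ofList [c] := by
      have h0 := congrArg String.ofList hl
      rwa [String.ofList_toList] at h0
    by_cases hc : 'A' ≤ c ∧ c ≤ 'Z'
    · rw [if_pos hc, hchar]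
      obtain ⟨h1, h2⟩ := hc
      have hlo : 65 ≤ c.toNat := h1
      have hhi : c.toNat ≤ 90 := h2
      have hc' : c = Char.ofNat c.toNat := (Char.ofNat_toNat c).symm
      obtain ⟨n, hn⟩ : ∃ n, c.toNat = n := ⟨_, rfl⟩
      rw [hn] at hlo hhi hc'
      interval_cases n <;> rw [hc'] <;> decide
    · rw [if_neg hc]
      rw [charToLowerLoop_none]
      intro d hd hde
      rw [singleton_eq_iff, hl] at hde
      have hdc : d = c := by injection hde.symm
      rw [upper_toList] at hd
      exact hc (hdc ▸ upper_mem_range d hd)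
  · -- length ≥ 2: loop never matches
    show _ = character
    rw [charToLowerLoop_none]
    intro d _ hd
    rw [singleton_eq_iff, hl] at hd
    simp at hd
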